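-- pv_equiv track=rewrite | github.com/Nestor-VP/TriceraBOT | manage_users.py | calc_role
-- ===== SOURCE A (Python) =====
-- def calc_role(elo):
--
--     intervals = [(800 + i * 200, 800 + (i + 1) * 200) for i in range(5)]
--     values = ['Aldeano', 'Milicia', 'Hombre de Armas', 'Espadachín', 'Espada Mandoble', 'Campeón', 'Legionario']
--
--     for i in range(len(intervals)):
--         interval = intervals[i]
--         value = values[i+1]
--
--         if elo >= interval[0] and elo < interval[1]:
--             return value
--
--     if elo < 800:
--         return values[0]
--     elif elo >= 1800:
--         return values[6]
-- ===== SOURCE B (Python) =====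
-- import bisect
--
-- def calc_role(elo):
--     values = ['Aldeano', 'Milicia', 'Hombre de Armas', 'Espadachín', 'Espada Mandoble', 'Campeón', 'Legionario']
--     boundaries = [800, 1000, 1200, 1400, 1600, 1800]
--     return values[bisect.bisect_right(boundaries, elo)]
-- ===== Notes on version B (the rewrite author's own statement) =====
-- stated objective: idiomatic
-- what changed: Replaces the linear interval scan with trailing if/elif fallbacks by a single table lookup indexed by bisect_right on the ordered boundary list.
import Mathlib
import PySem

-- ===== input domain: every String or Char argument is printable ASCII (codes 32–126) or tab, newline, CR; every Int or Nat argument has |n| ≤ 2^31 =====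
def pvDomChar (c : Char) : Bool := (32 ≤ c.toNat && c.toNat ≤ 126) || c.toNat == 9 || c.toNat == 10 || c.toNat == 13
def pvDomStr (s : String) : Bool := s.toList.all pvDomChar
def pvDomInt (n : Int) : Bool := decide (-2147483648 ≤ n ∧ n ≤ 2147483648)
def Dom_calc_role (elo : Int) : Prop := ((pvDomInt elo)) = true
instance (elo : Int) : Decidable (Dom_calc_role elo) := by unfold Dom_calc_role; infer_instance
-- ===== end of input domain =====

-- B replaces A's linear interval scan and trailing if/elif fallbacks by a bisect_right table lookup (idiomatic).

-- ===== PORT A =====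
-- Python's fall-through `return None` is unreachable for integer elo; that branch is "" here.
def calc_role (elo : Int) : String :=
  let intervals : List (Int × Int) :=
    (PySem.List.pyRange 0 5 1).map (fun i => (800 + i * 200, 800 + (i + 1) * 200))
  let values : List String :=
    ["Aldeano", "Milicia", "Hombre de Armas", "Espadachín", "Espada Mandoble", "Campeón", "Legionario"]
  let loopResult : Option String :=
    (PySem.List.pyRange 0 (intervals.length) 1).findSome? (fun i =>
      let interval := (PySem.List.pyGet? intervals i).getD (0, 0)
      let value := (PySem.List.pyGet? values (i + 1)).getD ""
      if elo ≥ interval.1 ∧ elo < interval.2 then some value else none)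
  match loopResult with
  | some v => v
  | none =>
    if elo < 800 then (PySem.List.pyGet? values 0).getD ""
    else if elo ≥ 1800 then (PySem.List.pyGet? values 6).getD ""
    else ""  -- unreachable for Int elo

-- ===== PORT B =====
-- port of Python's bisect.bisect_right on a list of ints
def pyBisectRight (a : List Int) (x : Int) (lo hi : Nat) : Nat :=
  if lo < hi then
    let mid := (lo + hi) / 2
    if x < a.getD mid 0 then pyBisectRight a x lo mid else pyBisectRight a x (mid + 1) hi
  else lo
termination_by hi - lo
decreasing_by all_goals omega

def calc_role_alt (elo : Int) : String :=
  let values : List String :=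
    ["Aldeano", "Milicia", "Hombre de Armas", "Espadachín", "Espada Mandoble", "Campeón", "Legionario"]
  let boundaries : List Int := [800, 1000, 1200, 1400, 1600, 1800]
  (PySem.List.pyGet? values (pyBisectRight boundaries elo 0 boundaries.length : Nat)).getD ""

-- ===== PRECONDITION & SPEC =====
def Spec_calc_role (elo : Int) (out : String) : Prop := out = calc_role_alt elo
instance (elo : Int) (out : String) : Decidable (Spec_calc_role elo out) := by unfold Spec_calc_role; infer_instance

-- ===== CLAIM (what is proved, stated in full; the proofs are below) =====
def Claim_equal_calc_role : Prop := ∀ (elo : Int), Dom_calc_role elo → Spec_calc_role elo (calc_role elo)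

-- ===== LEMMAS AND PROOFS =====

-- ===== VERDICT (by name: the statement is the Claim_ definition above) =====
theorem calc_role_spec : Claim_equal_calc_role := by
  intro elo _
  unfold Spec_calc_role calc_role calc_role_alt
  have pyr : PySem.List.pyRange 0 5 1 = [0,1,2,3,4] := by decide
  by_cases h0 : elo < 800
  · simp [pyBisectRight, pyr, PySem.List.pyGet?, PySem.List.pyIdx?, show elo < 800 by omega, show ¬ (800:Int) ≤ elo by omega, show elo < 1000 by omega, show ¬ (1000:Int) ≤ elo by omega, show elo < 1200 by omega, show ¬ (1200:Int) ≤ elo by omega, show elo < 1400 by omega, show ¬ (1400:Int) ≤ elo by omega, show elo < 1600 by omega, show ¬ (1600:Int) ≤ elo by omega, show elo < 1800 by omega, show ¬ (1800:Int) ≤ elo by omega]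
  by_cases h1 : elo < 1000
  · simp [pyBisectRight, pyr, PySem.List.pyGet?, PySem.List.pyIdx?, show ¬ elo < 800 by omega, show (800:Int) ≤ elo by omega, show elo < 1000 by omega, show ¬ (1000:Int) ≤ elo by omega, show elo < 1200 by omega, show ¬ (1200:Int) ≤ elo by omega, show elo < 1400 by omega, show ¬ (1400:Int) ≤ elo by omega, show elo < 1600 by omega, show ¬ (1600:Int) ≤ elo by omega, show elo < 1800 by omega, show ¬ (1800:Int) ≤ elo by omega]
  by_cases h2 : elo < 1200
  · simp [pyBisectRight, pyr, PySem.List.pyGet?, PySem.List.pyIdx?, show ¬ elo < 800 by omega, show (800:Int) ≤ elo by omega, show ¬ elo < 1000 by omega, show (1000:Int) ≤ elo by omega, show elo < 1200 by omega, show ¬ (1200:Int) ≤ elo by omega, show elo < 1400 by omega, show ¬ (1400:Int) ≤ elo by omega, show elo < 1600 by omega, show ¬ (1600:Int) ≤ elo by omega, show elo < 1800 by omega, show ¬ (1800:Int) ≤ elo by omega]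
  by_cases h3 : elo < 1400
  · simp [pyBisectRight, pyr, PySem.List.pyGet?, PySem.List.pyIdx?, show ¬ elo < 800 by omega, show (800:Int) ≤ elo by omega, show ¬ elo < 1000 by omega, show (1000:Int) ≤ elo by omega, show ¬ elo < 1200 by omega, show (1200:Int) ≤ elo by omega, show elo < 1400 by omega, show ¬ (1400:Int) ≤ elo by omega, show elo < 1600 by omega, show ¬ (1600:Int) ≤ elo by omega, show elo < 1800 by omega, show ¬ (1800:Int) ≤ elo by omega]
  by_cases h4 : elo < 1600
  · simp [pyBisectRight, pyr, PySem.List.pyGet?, PySem.List.pyIdx?, show ¬ elo < 800 by omega, show (800:Int) ≤ elo by omega, show ¬ elo < 1000 by omega, show (1000:Int) ≤ elo by omega, show ¬ elo < 1200 by omega, show (1200:Int) ≤ elo by omega, show ¬ elo < 1400 by omega, show (1400:Int) ≤ elo by omega, show elo < 1600 by omega, show ¬ (1600:Int) ≤ elo by omega, show elo < 1800 by omega, show ¬ (1800:Int) ≤ elo by omega]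
  by_cases h5 : elo < 1800
  · simp [pyBisectRight, pyr, PySem.List.pyGet?, PySem.List.pyIdx?, show ¬ elo < 800 by omega, show (800:Int) ≤ elo by omega, show ¬ elo < 1000 by omega, show (1000:Int) ≤ elo by omega, show ¬ elo < 1200 by omega, show (1200:Int) ≤ elo by omega, show ¬ elo < 1400 by omega, show (1400:Int) ≤ elo by omega, show ¬ elo < 1600 by omega, show (1600:Int) ≤ elo by omega, show elo < 1800 by omega, show ¬ (1800:Int) ≤ elo by omega]
  · simp [pyBisectRight, pyr, PySem.List.pyGet?, PySem.List.pyIdx?, show ¬ elo < 800 by omega, show (800:Int) ≤ elo by omega, show ¬ elo < 1000 by omega, show (1000:Int) ≤ elo by omega, show ¬ elo < 1200 by omega, show (1200:Int) ≤ elo by omega, show ¬ elo < 1400 by omega, show (1400:Int) ≤ elo by omega, show ¬ elo < 1600 by omega, show (1600:Int) ≤ elo by omega, show ¬ elo < 1800 by omega, show (1800:Int) ≤ elo by omega]
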